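-- pv_equiv track=rewrite | github.com/alvin-agustio/absa-fintech-review | scripts/build_v2_intersection.py | normalize_slang
-- ===== SOURCE A (Python) =====
-- def normalize_slang(text: str, slang_map: dict[str, str], whitelist: set[str]) -> tuple[str, int]:
--     tokens = text.split()
--     replacements = 0
--     normalized_tokens = []
--     for tok in tokens:
--         if tok in whitelist:
--             normalized_tokens.append(tok)
--             continue
--         repl = slang_map.get(tok)
--         if repl is not None and repl != tok:
--             normalized_tokens.append(repl)
--             replacements += 1
--         else:
--             normalized_tokens.append(tok)
--     return " ".join(normalized_tokens), replacements
-- ===== SOURCE B (Python) =====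
-- def normalize_slang(text, slang_map, whitelist):
--     # Precompute the effective replacement table once: drop whitelisted keys and
--     # identity pairs, so the per-token pass is a plain substitution.
--     eff = {k: v for k, v in slang_map.items() if k not in whitelist and v != k}
--     tokens = text.split()
--     return " ".join(eff.get(t, t) for t in tokens), sum(t in eff for t in tokens)
-- ===== Notes on version B (the rewrite author's own statement) =====
-- stated objective: alternative
-- what changed: Instead of branching per token on whitelist membership, dict lookup and an identity test while counting in one accumulator loop, B precomputes an effective replacement dict (slang pairs minus whitelisted keys and identity mappings) once; the token pass is then a bare substitution and the count is simply how many tokens are keys of that dict.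
import Mathlib
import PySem

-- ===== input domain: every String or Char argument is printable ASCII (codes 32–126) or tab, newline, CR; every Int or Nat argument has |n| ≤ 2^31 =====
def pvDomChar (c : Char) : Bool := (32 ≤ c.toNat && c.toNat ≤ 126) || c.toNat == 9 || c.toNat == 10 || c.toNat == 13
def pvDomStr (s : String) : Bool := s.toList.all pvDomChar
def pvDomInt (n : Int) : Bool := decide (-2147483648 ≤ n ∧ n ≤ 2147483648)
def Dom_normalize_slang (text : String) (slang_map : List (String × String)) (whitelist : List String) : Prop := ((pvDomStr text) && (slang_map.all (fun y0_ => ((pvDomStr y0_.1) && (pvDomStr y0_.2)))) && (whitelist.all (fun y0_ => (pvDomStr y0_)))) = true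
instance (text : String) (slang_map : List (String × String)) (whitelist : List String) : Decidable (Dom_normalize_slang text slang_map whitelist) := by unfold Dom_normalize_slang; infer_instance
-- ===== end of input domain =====

-- B precomputes the effective replacement table (slang pairs minus whitelisted keys and
-- identity mappings) once, so the token pass is a bare substitution and the count is the
-- number of tokens that are keys of that table; objective: alternative decomposition.
-- ===== PORT A =====
def normalize_slang (text : String) (slang_map : List (String × String)) (whitelist : List String) : String × Int :=
  let tokens := PySem.Str.split₀ text
  let st := tokens.foldl (fun (s : List String × Int) tok =>
    if whitelist.contains tok then (s.1 ++ [tok], s.2)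
    else
      match slang_map.lookup tok with
      | some repl => if repl ≠ tok then (s.1 ++ [repl], s.2 + 1) else (s.1 ++ [tok], s.2)
      | none => (s.1 ++ [tok], s.2)) ([], 0)
  (PySem.Str.join " " st.1, st.2)

-- ===== PORT B =====
-- the dict comprehension: keep pairs whose key is not whitelisted and whose value differs
def nsEff (slang_map : List (String × String)) (whitelist : List String) : List (String × String) :=
  slang_map.filter (fun p => !(whitelist.contains p.1) && p.2 != p.1)

def normalize_slang_alt (text : String) (slang_map : List (String × String)) (whitelist : List String) : String × Int :=
  let eff := nsEff slang_map whitelist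
  let tokens := PySem.Str.split₀ text
  (PySem.Str.join " " (tokens.map (fun t => (eff.lookup t).getD t)),
   ((tokens.countP (fun t => (eff.lookup t).isSome) : Nat) : Int))

-- ===== PRECONDITION & SPEC =====
-- Pre_ requires distinct keys: the association list stands for a Python dict, which
-- cannot contain duplicate keys, so no Python input is excluded.
def Pre_normalize_slang (text : String) (slang_map : List (String × String)) (whitelist : List String) : Prop :=
  (slang_map.map Prod.fst).Nodup
instance (text : String) (slang_map : List (String × String)) (whitelist : List String) : Decidable (Pre_normalize_slang text slang_map whitelist) := by unfold Pre_normalize_slang; infer_instance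
def pvWitness_normalize_slang : String × (List (String × String)) × List String :=
  ("gpp bgt sih", [("gpp", "tidak apa apa"), ("bgt", "banget")], ["sih"])

def Spec_normalize_slang (text : String) (slang_map : List (String × String)) (whitelist : List String) (out : String × Int) : Prop := out = normalize_slang_alt text slang_map whitelist
instance (text : String) (slang_map : List (String × String)) (whitelist : List String) (out : String × Int) : Decidable (Spec_normalize_slang text slang_map whitelist out) := by unfold Spec_normalize_slang; infer_instance

-- ===== CLAIM (what is proved, stated in full; the proofs are below) =====
def Claim_equal_normalize_slang : Prop := ∀ (text : String) (slang_map : List (String × String)) (whitelist : List String), Dom_normalize_slang text slang_map whitelist → Pre_normalize_slang text slang_map whitelist → Spec_normalize_slang text slang_map whitelist (normalize_slang text slang_map whitelist)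

-- ===== LEMMAS AND PROOFS =====
lemma ns_lookup_none_of_not_key (t : String) :
    ∀ l : List (String × String), t ∉ l.map Prod.fst → l.lookup t = none := by
  intro l
  induction l with
  | nil => intro _; rfl
  | cons p rest ih =>
    intro h
    have h1 : ¬ t = p.1 := fun he => h (by simp [he])
    have h2 : t ∉ rest.map Prod.fst := fun hm => h (by simp [hm])
    obtain ⟨k, v⟩ := p
    have hbeq : (t == k) = false := by simp [h1]
    simp only [List.lookup, hbeq]
    exact ih h2

lemma ns_lookup_filter (q : String × String → Bool) :
    ∀ l : List (String × String), (l.map Prod.fst).Nodup → ∀ t : String,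
      (l.filter q).lookup t = (l.lookup t).bind (fun v => if q (t, v) then some v else none) := by
  intro l
  induction l with
  | nil => intro _ t; rfl
  | cons p rest ih =>
    intro hnd t
    obtain ⟨k, v⟩ := p
    have hnd' : (rest.map Prod.fst).Nodup := (List.nodup_cons.mp (by simpa using hnd)).2
    have hk : k ∉ rest.map Prod.fst := (List.nodup_cons.mp (by simpa using hnd)).1
    by_cases ht : t = k
    · subst ht
      by_cases hq : q (t, v) = true
      · simp [List.lookup, hq]
      · have hnone : ((rest.filter q).lookup t) = none := by
          apply ns_lookup_none_of_not_key
          intro hm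
          apply hk
          rcases List.mem_map.mp hm with ⟨p', hp', he⟩
          exact List.mem_map.mpr ⟨p', List.mem_of_mem_filter hp', he⟩
        simp [List.lookup, hq, hnone]
    · have hbeq : (t == k) = false := by simp [ht]
      by_cases hq : q (k, v) = true
      · simp [List.lookup, hq, hbeq, ih hnd' t]
      · simp [List.lookup, hq, hbeq, ih hnd' t]

lemma ns_fold_eq (slang_map : List (String × String)) (whitelist : List String)
    (hnd : (slang_map.map Prod.fst).Nodup) :
    ∀ (toks : List String) (acc : List String) (c : Int),
      toks.foldl (fun (s : List String × Int) tok =>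
        if whitelist.contains tok then (s.1 ++ [tok], s.2)
        else
          match slang_map.lookup tok with
          | some repl => if repl ≠ tok then (s.1 ++ [repl], s.2 + 1) else (s.1 ++ [tok], s.2)
          | none => (s.1 ++ [tok], s.2)) (acc, c)
      = (acc ++ toks.map (fun t => (((nsEff slang_map whitelist).lookup t).getD t)),
         c + ((toks.countP (fun t => ((nsEff slang_map whitelist).lookup t).isSome) : Nat) : Int)) := by
  intro toks
  induction toks with
  | nil => intro acc c; simp
  | cons t ts ih =>
    intro acc c
    have hlk := ns_lookup_filter (fun p => !(whitelist.contains p.1) && p.2 != p.1) slang_map hnd t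
    rw [List.foldl_cons]
    by_cases hw : whitelist.contains t = true
    · have heff : (nsEff slang_map whitelist).lookup t = none := by
        rw [nsEff, hlk]
        cases slang_map.lookup t with
        | none => rfl
        | some v =>
          simp only [Option.bind_some]
          rw [if_neg (by
            intro hc
            rw [show whitelist.contains (t, v).1 = true from hw] at hc
            simp at hc)]
      rw [if_pos hw, ih]
      simp [heff, List.countP_cons]
    · rw [if_neg hw]
      cases hg : slang_map.lookup t with
      | none =>
        have heff : (nsEff slang_map whitelist).lookup t = none := by
          rw [nsEff, hlk, hg]; rfl
        simp only [ih]
        simp [heff, List.countP_cons]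
      | some r =>
        by_cases hrt : r = t
        · have heff : (nsEff slang_map whitelist).lookup t = none := by
            rw [nsEff, hlk, hg]; simp [hrt]
          simp only [hg]
          rw [if_neg (by simp [hrt]), ih]
          simp [heff, List.countP_cons]
        · have heff : (nsEff slang_map whitelist).lookup t = some r := by
            rw [nsEff, hlk, hg]
            have hwf : whitelist.contains t = false := by
              cases h : whitelist.contains t
              · rfl
              · exact absurd h hw
            simp only [Option.bind_some]
            rw [if_pos (by
              rw [show whitelist.contains (t, r).1 = false from hwf]
              simp [hrt])]
          simp only [hg]
          rw [if_pos (by simp [hrt]), ih]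
          refine Prod.ext (by simp [heff]) ?_
          simp [heff, List.countP_cons]
          push_cast
          ring

-- ===== VERDICT (by name: the statement is the Claim_ definition above) =====
theorem normalize_slang_spec : Claim_equal_normalize_slang := by
  intro text slang_map whitelist _ hpre
  unfold Spec_normalize_slang normalize_slang normalize_slang_alt
  simp only [ns_fold_eq slang_map whitelist hpre]
  simp
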